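-- pv_equiv track=rewrite | github.com/alvinwan/abcSICP | chapter1.py | first_one
-- ===== SOURCE A (Python) =====
-- def first_one(n):
--     """Replace each digit in a number with its distance -- in digits -- from the
--     first 1 to come *after* it. Any number that does not have a 1 after it will
--     be replaced by a 0, and two digits side-by-side have a distance of 1. For
--     example, 5312 would become 2100. '5' is 2 away from 1, and '3' is 1 away.
--     The '1' itself and '2' have no ones after it, so they both become 0s. Assume
--     there is no distance greater than 9.
--
--     >>> first_one(10001)
--     43210
--     >>> first_one(151646142)
--     214321000
--     """
--     def next_dist(last, dist):
--         if last == 1: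
--             return 1
--         return 0 if dist == 0 else dist + 1
--     dist, i, new = 0, 0, 0
--     while n:
--         n, last, new = n // 10, n % 10, new + (10**i * dist)
--         dist, i = next_dist(last, dist), i + 1
--     return new
-- ===== SOURCE B (Python) =====
-- def first_one(n):
--     digits = []
--     while n:
--         digits.append(n % 10)
--         n //= 10
--     new = 0
--     for j in range(len(digits)):
--         dist = 0
--         k = j - 1
--         while k >= 0:
--             if digits[k] == 1:
--                 dist = j - k
--                 break
--             k -= 1
--         new += 10 ** j * dist
--     return new
-- ===== Notes on version B (the rewrite author's own statement) =====
-- stated objective: alternative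
-- what changed: A computes each digit's distance to the nearest lower 1 incrementally in one running-state pass; B first extracts the digit list, then does an explicit backward scan per digit for the nearest 1 and sums 10**j * dist.
import Mathlib
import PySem

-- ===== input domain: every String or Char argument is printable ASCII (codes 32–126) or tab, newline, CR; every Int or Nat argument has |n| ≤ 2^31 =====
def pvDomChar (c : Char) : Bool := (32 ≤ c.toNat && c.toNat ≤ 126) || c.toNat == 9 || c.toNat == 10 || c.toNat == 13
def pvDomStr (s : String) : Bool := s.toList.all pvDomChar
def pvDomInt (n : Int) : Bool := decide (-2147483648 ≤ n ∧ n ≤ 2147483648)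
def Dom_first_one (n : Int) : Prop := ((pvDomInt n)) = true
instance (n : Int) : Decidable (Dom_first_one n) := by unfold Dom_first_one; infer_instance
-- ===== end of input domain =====

-- B replaces A's single incremental running-distance pass with digit extraction followed by a
-- per-digit backward scan for the nearest 1 (objective: alternative algorithm, not faster).

-- ===== PORT A =====
-- next_dist helper of A
def pvNextDist (last dist : Int) : Int :=
  if last = 1 then 1 else if dist = 0 then 0 else dist + 1

-- A's while-loop; fuel only makes the recursion total (Python diverges on n < 0; there the claim is about the fueled ports only)
def pvGoA : Nat → Int → Int → Nat → Int → Int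
  | 0, _, _, _, new => new
  | fuel + 1, n, dist, i, new =>
    if n = 0 then new
    else pvGoA fuel (PySem.Int.floordiv n 10) (pvNextDist (PySem.Int.mod n 10) dist)
           (i + 1) (new + 10 ^ i * dist)

def first_one (n : Int) : Int := pvGoA (n.toNat + 1) n 0 0 0

-- ===== PORT B =====
-- B's digit-extraction loop (LSB first); same fuel-for-totality as A
def pvDigits : Nat → Int → List Int
  | 0, _ => []
  | fuel + 1, n =>
    if n = 0 then []
    else PySem.Int.mod n 10 :: pvDigits fuel (PySem.Int.floordiv n 10)

-- B's inner while-loop: k runs kk-1, kk-2, …, 0; returns j - k for the first k with digits[k] = 1, else 0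
def pvScan (digits : List Int) (j : Nat) : Nat → Int
  | 0 => 0
  | kk + 1 => if digits.getD kk 0 = 1 then (j : Int) - (kk : Int) else pvScan digits j kk

def first_one_alt (n : Int) : Int :=
  let digits := pvDigits (n.toNat + 1) n
  (List.range digits.length).foldl (fun new j => new + 10 ^ j * pvScan digits j j) 0

-- ===== PRECONDITION & SPEC =====
def Spec_first_one (n : Int) (out : Int) : Prop := out = first_one_alt n
instance (n : Int) (out : Int) : Decidable (Spec_first_one n out) := by unfold Spec_first_one; infer_instance

-- ===== CLAIM (what is proved, stated in full; the proofs are below) =====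
def Claim_equal_first_one : Prop := ∀ (n : Int), Dom_first_one n → Spec_first_one n (first_one n)

-- ===== LEMMAS AND PROOFS =====

-- A's running distance reconstructed by index: dA ds dist j is the dist state after j iterations
def pvDA (ds : List Int) (dist : Int) : Nat → Int
  | 0 => dist
  | j + 1 => pvNextDist (ds.getD j 0) (pvDA ds dist j)

-- the value A's loop adds after the prefix is consumed
def pvS : List Int → Int → Nat → Int
  | [], _, _ => 0
  | d :: ds, dist, i => 10 ^ i * dist + pvS ds (pvNextDist d dist) (i + 1)

theorem pvGoA_eq_S : ∀ (fuel : Nat) (n dist : Int) (i : Nat) (new : Int),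
    pvGoA fuel n dist i new = new + pvS (pvDigits fuel n) dist i := by
  intro fuel
  induction fuel with
  | zero => intro n dist i new; simp [pvGoA, pvDigits, pvS]
  | succ f ih =>
    intro n dist i new
    by_cases h : n = 0
    · simp [pvGoA, pvDigits, h, pvS]
    · rw [pvGoA, pvDigits, if_neg h, if_neg h, ih, pvS]
      ring

theorem pvDA_cons (d : Int) (ds : List Int) (dist : Int) :
    ∀ j : Nat, pvDA (d :: ds) dist (j + 1) = pvDA ds (pvNextDist d dist) j := by
  intro j
  induction j with
  | zero => simp [pvDA]
  | succ k ih =>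
    have h1 : pvDA (d :: ds) dist (k + 1 + 1)
        = pvNextDist ((d :: ds).getD (k + 1) 0) (pvDA (d :: ds) dist (k + 1)) := rfl
    rw [h1, ih, List.getD_cons_succ]
    rfl

theorem pvS_eq_sum : ∀ (ds : List Int) (dist : Int) (i : Nat),
    pvS ds dist i = ∑ j ∈ Finset.range ds.length, 10 ^ (i + j) * pvDA ds dist j := by
  intro ds
  induction ds with
  | nil => intro dist i; simp [pvS]
  | cons d ds ih =>
    intro dist i
    rw [List.length_cons, Finset.sum_range_succ', pvS, ih]
    have e1 : ∀ j ∈ Finset.range ds.length,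
        (10:Int) ^ (i + (j + 1)) * pvDA (d :: ds) dist (j + 1)
          = 10 ^ (i + 1 + j) * pvDA ds (pvNextDist d dist) j := by
      intro j _
      rw [pvDA_cons]
      congr 2
      omega
    rw [Finset.sum_congr rfl e1]
    have e2 : pvDA (d :: ds) dist 0 = dist := rfl
    rw [e2]
    ring

theorem pvScan_step (ds : List Int) (j : Nat) : ∀ kk : Nat, kk ≤ j →
    pvScan ds (j + 1) kk = if pvScan ds j kk = 0 then 0 else pvScan ds j kk + 1 := by
  intro kk
  induction kk with
  | zero => intro _; simp [pvScan]
  | succ k ih =>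
    intro hk
    by_cases hd : ds.getD k 0 = 1
    · rw [pvScan, pvScan, if_pos hd, if_pos hd]
      have hne : ((j : Int)) - (k : Int) ≠ 0 := by omega
      rw [if_neg hne]
      push_cast
      ring
    · rw [pvScan, pvScan, if_neg hd, if_neg hd]
      exact ih (by omega)

theorem pvScan_eq_DA (ds : List Int) : ∀ j : Nat, pvScan ds j j = pvDA ds 0 j := by
  intro j
  induction j with
  | zero => rfl
  | succ j ih =>
    rw [pvDA, ← ih, pvNextDist, pvScan, pvScan_step ds j j le_rfl]
    by_cases hd : ds.getD j 0 = 1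
    · rw [if_pos hd, if_pos hd]
      push_cast
      ring
    · rw [if_neg hd, if_neg hd]

theorem pvFoldl_add_sum (g : Nat → Int) : ∀ (m : Nat) (c : Int),
    (List.range m).foldl (fun acc j => acc + g j) c = c + ∑ j ∈ Finset.range m, g j := by
  intro m
  induction m with
  | zero => intro c; simp
  | succ m ih =>
    intro c
    rw [List.range_succ, List.foldl_append, ih, Finset.sum_range_succ]
    simp [add_assoc]

-- ===== VERDICT (by name: the statement is the Claim_ definition above) =====
theorem first_one_spec : Claim_equal_first_one := by
  intro n _
  unfold Spec_first_one first_one first_one_alt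
  rw [pvGoA_eq_S, pvS_eq_sum, pvFoldl_add_sum]
  simp only [zero_add, pvScan_eq_DA]
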